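-- pv_equiv track=rewrite | github.com/joel-kallarackal/Multi_Robot_Path_Planning_ED5215 | spatio_temporal_search_v2.py | build_wait_for_graph
-- ===== SOURCE A (Python) =====
-- from collections import defaultdict
-- from collections import defaultdict
--
-- def build_wait_for_graph(paths):
--     wfg = defaultdict(int)  # directed graph: robot A → robot B
--
--     for i in range(len(paths)):
--         for j in range(len(paths)):
--             if i==j:
--                 continue
--             for t in range(min(len(paths[i]), len(paths[j]))):
--                 if paths[i][t] == paths[j][t]:
--                     wfg[i] = j
--
--     return wfg
-- ===== SOURCE B (Python) =====
-- def build_wait_for_graph(paths):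
--     # Time-major hashing: for each time step t, bucket the robots by their
--     # position at t (tracking only the largest and second-largest index per
--     # position); a robot's wait-for target is the largest index ever sharing a
--     # (time, position) cell with it.  O(n*T) instead of A's O(n^2*T) pair scan.
--     best = {}
--     T = max((len(p) for p in paths), default=0)
--     for t in range(T):
--         m1 = {}  # position at time t -> largest robot index there
--         m2 = {}  # position at time t -> second largest robot index there
--         for i, p in enumerate(paths):
--             if t < len(p):
--                 v = p[t]
--                 if v in m1:
--                     m2[v] = m1[v]
--                 m1[v] = i
--         for i, p in enumerate(paths):
--             if t < len(p):
--                 v = p[t]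
--                 if v in m2:  # at least two robots in this cell
--                     cand = m2[v] if i == m1[v] else m1[v]
--                     if i not in best or cand > best[i]:
--                         best[i] = cand
--     return {i: best[i] for i in sorted(best)}
-- ===== Notes on version B (the rewrite author's own statement) =====
-- stated objective: faster
-- what changed: B is time-major instead of pair-major: for each time step it hashes robots by their position into a dict keeping only the largest and second-largest robot index per position, and each robot's wait-for target is the running maximum of its cell's top other index, removing A's O(n^2) pairwise scan.
import Mathlib
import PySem

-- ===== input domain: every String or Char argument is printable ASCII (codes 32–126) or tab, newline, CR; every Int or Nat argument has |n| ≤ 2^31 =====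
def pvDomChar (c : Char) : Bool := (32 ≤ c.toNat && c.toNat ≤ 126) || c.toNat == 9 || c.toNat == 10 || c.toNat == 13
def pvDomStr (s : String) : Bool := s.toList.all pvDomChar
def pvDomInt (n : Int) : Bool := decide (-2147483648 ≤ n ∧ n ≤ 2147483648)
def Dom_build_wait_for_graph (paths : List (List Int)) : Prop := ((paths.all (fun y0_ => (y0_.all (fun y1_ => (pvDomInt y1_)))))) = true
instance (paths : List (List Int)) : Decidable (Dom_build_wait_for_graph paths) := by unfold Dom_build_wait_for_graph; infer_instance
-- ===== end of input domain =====

-- B replaces A's O(n^2*T) pairwise scan by time-major hashing: per time step it buckets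
-- robots by position, keeping only the largest and second-largest index per bucket.

-- ===== PORT A =====
-- literal transliteration of A: nested i,j loops over range(n), inner t loop over
-- range(min lengths), wfg[i] = j on every positional match; return the dict's items
def build_wait_for_graph (paths : List (List Int)) : List (Int × Int) :=
  let n : Int := paths.length
  ((PySem.List.pyRange 0 n 1).foldl (fun d i =>
    (PySem.List.pyRange 0 n 1).foldl (fun d j =>
      if i == j then d
      else
        let pi := PySem.List.pyGetD paths i []
        let pj := PySem.List.pyGetD paths j []
        (PySem.List.pyRange 0 (min (pi.length : Int) (pj.length : Int)) 1).foldl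
          (fun d t =>
            if PySem.List.pyGet? pi t == PySem.List.pyGet? pj t then d.insert i j else d)
          d) d)
    (PySem.Dict.empty : PySem.Dict Int Int)).items

-- ===== PORT B =====
-- Source B's T = max((len(p) for p in paths), default=0)
def pvMaxLen (paths : List (List Int)) : Int :=
  (PySem.List.max? (paths.map (fun p => (p.length : Int))) (fun x => x)).getD 0

-- Source B's first inner loop at time t: m1 = largest robot index per position, m2 = second largest
def pvPhase1 (paths : List (List Int)) (t : Int) :
    PySem.Dict Int Int × PySem.Dict Int Int :=
  (PySem.List.enumerate paths 0).foldl
    (fun md ip =>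
      if t < (ip.2.length : Int) then
        let v := PySem.List.pyGetD ip.2 t 0   -- p[t]; exact here: 0 ≤ t < len(p)
        let m2 := match md.1.get? v with
                  | some w => md.2.insert v w
                  | none => md.2
        (md.1.insert v ip.1, m2)
      else md)
    (PySem.Dict.empty, PySem.Dict.empty)

-- Source B's second inner loop at time t: fold each robot's cell candidate into best
def pvPhase2 (paths : List (List Int)) (t : Int)
    (m1 m2 : PySem.Dict Int Int) (best : PySem.Dict Int Int) : PySem.Dict Int Int :=
  (PySem.List.enumerate paths 0).foldl
    (fun best ip =>
      if t < (ip.2.length : Int) then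
        let v := PySem.List.pyGetD ip.2 t 0
        match m2.get? v with
        | some s =>
            let cand := if ip.1 == m1.getD v 0 then s else m1.getD v 0
            match best.get? ip.1 with
            | none => best.insert ip.1 cand
            | some b => if b < cand then best.insert ip.1 cand else best
        | none => best
      else best)
    best

def build_wait_for_graph_alt (paths : List (List Int)) : List (Int × Int) :=
  let T := pvMaxLen paths
  let best := (PySem.List.pyRange 0 T 1).foldl
    (fun best t =>
      let md := pvPhase1 paths t
      pvPhase2 paths t md.1 md.2 best)
    (PySem.Dict.empty : PySem.Dict Int Int)
  (PySem.List.sorted best.keys (fun x => x) false).filterMap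
    (fun k => (best.get? k).map (fun v => (k, v)))

-- ===== PRECONDITION & SPEC =====
def Spec_build_wait_for_graph (paths : List (List Int)) (out : List (Int × Int)) : Prop := out = build_wait_for_graph_alt paths
instance (paths : List (List Int)) (out : List (Int × Int)) : Decidable (Spec_build_wait_for_graph paths out) := by unfold Spec_build_wait_for_graph; infer_instance

-- ===== CLAIM (what is proved, stated in full; the proofs are below) =====
def Claim_equal_build_wait_for_graph : Prop := ∀ (paths : List (List Int)), Dom_build_wait_for_graph paths → Spec_build_wait_for_graph paths (build_wait_for_graph paths)

-- ===== LEMMAS AND PROOFS =====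

-- greatest index j < m with p j, by downward search (proof-layer device shared by both sides)
def gmax (p : Nat → Bool) : Nat → Option Nat
  | 0 => none
  | m + 1 => if p m then some m else gmax p m

def omax : Option Nat → Option Nat → Option Nat
  | none, b => b
  | some a, none => some a
  | some a, some b => some (max a b)

theorem gmax_eq_none {p : Nat → Bool} {m : Nat} :
    gmax p m = none ↔ ∀ j < m, p j = false := by
  induction m with
  | zero => simp [gmax]
  | succ m ih =>
      simp only [gmax]
      by_cases h : p m = true
      · rw [if_pos h]
        constructor
        · intro hc; exact (Option.some_ne_none _ hc).elim
        · intro hall; exact absurd (hall m (Nat.lt_succ_self m)) (by simp [h])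
      · rw [if_neg h, ih]
        constructor
        · intro hall j hj
          rcases Nat.lt_succ_iff_lt_or_eq.mp hj with h' | h'
          · exact hall j h'
          · subst h'; simpa using h
        · intro hall j hj; exact hall j (by omega)

theorem gmax_some {p : Nat → Bool} {m a : Nat} (h : gmax p m = some a) :
    a < m ∧ p a = true := by
  induction m with
  | zero => cases h
  | succ m ih =>
      by_cases hp : p m = true
      · simp only [gmax, if_pos hp, Option.some_inj] at h
        subst h
        exact ⟨Nat.lt_succ_self _, hp⟩
      · simp only [gmax, if_neg hp] at h
        obtain ⟨h1, h2⟩ := ih h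
        exact ⟨by omega, h2⟩

theorem gmax_isMax {p : Nat → Bool} {m a : Nat} (h : gmax p m = some a) :
    ∀ j < m, p j = true → j ≤ a := by
  induction m with
  | zero => intro j hj; omega
  | succ m ih =>
      by_cases hp : p m = true
      · simp only [gmax, if_pos hp, Option.some_inj] at h
        subst h
        intro j hj _; omega
      · simp only [gmax, if_neg hp] at h
        intro j hj hpj
        rcases Nat.lt_succ_iff_lt_or_eq.mp hj with h' | h'
        · exact ih h j h' hpj
        · subst h'; exact absurd hpj hp

theorem gmax_congr {p q : Nat → Bool} (m : Nat) (h : ∀ j < m, p j = q j) :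
    gmax p m = gmax q m := by
  induction m with
  | zero => rfl
  | succ m ih =>
      simp only [gmax, h m (Nat.lt_succ_self m)]
      rw [ih (fun j hj => h j (by omega))]

theorem gmax_or (p q : Nat → Bool) (m : Nat) :
    gmax (fun j => p j || q j) m = omax (gmax p m) (gmax q m) := by
  induction m with
  | zero => rfl
  | succ m ih =>
      simp only [gmax]
      by_cases hp : p m = true
      · rw [if_pos hp, if_pos (by simp [hp])]
        by_cases hq : q m = true
        · rw [if_pos hq]; simp [omax]
        · rw [if_neg hq]
          cases hQ : gmax q m with
          | none => simp [omax]
          | some b =>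
              have hb := (gmax_some hQ).1
              simp [omax, Nat.max_eq_left (Nat.le_of_lt hb)]
      · by_cases hq : q m = true
        · rw [if_pos (by simp [hp, hq]), if_neg hp, if_pos hq]
          cases hP : gmax p m with
          | none => simp [omax]
          | some a =>
              have ha := (gmax_some hP).1
              simp [omax, Nat.max_eq_right (Nat.le_of_lt ha)]
        · rw [if_neg (by simp [hp, hq]), if_neg hp, if_neg hq]
          exact ih

theorem gmax_erase {p : Nat → Bool} {i : Nat} (n : Nat) (hpi : p i = true) (hi : i < n) :
    gmax (fun j => decide (j ≠ i) && p j) n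
      = if gmax p n = some i then gmax p i else gmax p n := by
  induction n with
  | zero => omega
  | succ n ih =>
      have hun : gmax (fun j => decide (j ≠ i) && p j) (n + 1)
          = if (decide (n ≠ i) && p n) = true then some n
            else gmax (fun j => decide (j ≠ i) && p j) n := rfl
      by_cases hpn : p n = true
      · by_cases hni : n = i
        · subst hni
          rw [hun, if_neg (by simp)]
          simp only [gmax, if_pos hpn]
          rw [if_pos trivial]
          exact gmax_congr n (fun j hj => by simp [Nat.ne_of_lt hj])
        · rw [hun, if_pos (by simp [hni, hpn])]
          simp only [gmax, if_pos hpn]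
          rw [if_neg (by intro hc; exact hni (Option.some_inj.mp hc))]
      · have hi' : i < n := by
          rcases Nat.lt_succ_iff_lt_or_eq.mp hi with h' | h'
          · exact h'
          · subst h'; exact absurd hpi hpn
        rw [hun, if_neg (by simp [hpn])]
        simp only [gmax, if_neg hpn]
        exact ih hi'

-- ---------- A side ----------

-- A's collision test between robots i and j (j ≠ i, some aligned position equal)
def pvHit (paths : List (List Int)) (i j : Nat) : Bool :=
  decide (j ≠ i) &&
    (((paths.getD i []).zip (paths.getD j [])).any (fun ab => ab.1 == ab.2))

-- A's inner t loop either inserts (i, j) (if some aligned position matches) or leaves d unchanged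
theorem pv_inner_loop (pi pj : List Int) (i j : Int) (d : PySem.Dict Int Int) (m : Nat) :
    (PySem.List.pyRange 0 (m : Int) 1).foldl
      (fun d t => if PySem.List.pyGet? pi t == PySem.List.pyGet? pj t then d.insert i j else d) d
    = if (∃ t : Nat, t < m ∧ (PySem.List.pyGet? pi (t : Int) == PySem.List.pyGet? pj (t : Int)) = true)
      then d.insert i j else d := by
  induction m with
  | zero => simp
  | succ m ih =>
      have h : ((m + 1 : Nat) : Int) = (m : Int) + 1 := by push_cast; ring
      rw [h, PySem.List.pyRange_one_succ_right (by positivity), List.foldl_append]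
      rw [ih]
      by_cases hm : (PySem.List.pyGet? pi (m : Int) == PySem.List.pyGet? pj (m : Int)) = true
      · by_cases hex : (∃ t : Nat, t < m ∧ (PySem.List.pyGet? pi (t : Int) == PySem.List.pyGet? pj (t : Int)) = true)
        · simp only [List.foldl_cons, List.foldl_nil, if_pos hm, if_pos hex,
            PySem.Dict.insert_insert_self]
          rw [if_pos ⟨m, by omega, hm⟩]
        · simp only [List.foldl_cons, List.foldl_nil, if_pos hm, if_neg hex]
          rw [if_pos ⟨m, by omega, hm⟩]
      · have : (∃ t : Nat, t < m + 1 ∧ (PySem.List.pyGet? pi (t : Int) == PySem.List.pyGet? pj (t : Int)) = true)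
            ↔ (∃ t : Nat, t < m ∧ (PySem.List.pyGet? pi (t : Int) == PySem.List.pyGet? pj (t : Int)) = true) := by
          constructor
          · rintro ⟨t, ht, hc⟩
            refine ⟨t, ?_, hc⟩
            rcases Nat.lt_succ_iff_lt_or_eq.mp ht with h' | h'
            · exact h'
            · exact absurd (h' ▸ hc) hm
          · rintro ⟨t, ht, hc⟩; exact ⟨t, by omega, hc⟩
        have hm' : pi[m]? ≠ pj[m]? := by simpa using hm
        simp only [this]
        simp [hm']

-- the zip/any collision test holds iff some aligned index matches
theorem pv_zip_any (p q : List Int) :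
    ((p.zip q).any (fun ab => ab.1 == ab.2)) = true
    ↔ ∃ t : Nat, t < min p.length q.length ∧
        (PySem.List.pyGet? p (t : Int) == PySem.List.pyGet? q (t : Int)) = true := by
  induction p generalizing q with
  | nil => simp
  | cons a p ih =>
    cases q with
    | nil => simp
    | cons b q =>
      simp only [List.zip_cons_cons, List.any_cons, Bool.or_eq_true, ih]
      constructor
      · rintro (h | ⟨t, ht, hc⟩)
        · exact ⟨0, by simp, by simpa using h⟩
        · refine ⟨t + 1, by simp; omega, ?_⟩
          simpa using hc
      · rintro ⟨t, ht, hc⟩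
        cases t with
        | zero => left; simpa using hc
        | succ t => right; exact ⟨t, by simp at ht; omega, by simpa using hc⟩

-- A's middle j loop, run ascending with overwrites, ends as one insert of the
-- largest colliding j — the greatest index gmax finds
theorem pv_middle_loop (paths : List (List Int)) (iN : Nat) (d : PySem.Dict Int Int) (m : Nat) :
    (PySem.List.pyRange 0 (m : Int) 1).foldl (fun d j =>
      if (iN : Int) == j then d
      else
        let pi := PySem.List.pyGetD paths (iN : Int) []
        let pj := PySem.List.pyGetD paths j []
        (PySem.List.pyRange 0 (min (pi.length : Int) (pj.length : Int)) 1).foldl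
          (fun d t =>
            if PySem.List.pyGet? pi t == PySem.List.pyGet? pj t then d.insert (iN : Int) j else d)
          d) d
    = match gmax (pvHit paths iN) m with
      | none => d
      | some j => d.insert (iN : Int) (j : Int) := by
  induction m with
  | zero => simp [gmax]
  | succ m ih =>
      have h : ((m + 1 : Nat) : Int) = (m : Int) + 1 := by push_cast; ring
      rw [h, PySem.List.pyRange_one_succ_right (by positivity), List.foldl_append]
      rw [ih]
      simp only [List.foldl_cons, List.foldl_nil]
      set pi := PySem.List.pyGetD paths (iN : Int) [] with hpi
      set pj := PySem.List.pyGetD paths ((m : Nat) : Int) [] with hpj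
      have hmin : (min (pi.length : Int) (pj.length : Int)) = ((min pi.length pj.length : Nat) : Int) := by
        push_cast; rfl
      have hgm : gmax (pvHit paths iN) (m + 1)
          = if pvHit paths iN m = true then some m else gmax (pvHit paths iN) m := rfl
      have hpjD : pj = paths.getD m [] := by
        rw [hpj, PySem.List.pyGetD_natCast]
      have hpiD : pi = paths.getD iN [] := by
        rw [hpi, PySem.List.pyGetD_natCast]
      by_cases hi : iN = m
      · have hC : ((iN : Int) == ((m : Nat) : Int)) = true := by simp [hi]
        rw [if_pos hC, hgm]
        have : pvHit paths iN m = false := by simp [pvHit, hi]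
        rw [if_neg (by simp [this])]
      · have hC : ¬ (((iN : Int) == ((m : Nat) : Int)) = true) := by simpa using hi
        rw [if_neg hC]
        rw [hmin, pv_inner_loop]
        rw [hgm]
        by_cases hz : ((pi.zip pj).any (fun ab => ab.1 == ab.2)) = true
        · have hex := (pv_zip_any pi pj).mp hz
          rw [if_pos hex]
          have : pvHit paths iN m = true := by
            simp only [pvHit]
            rw [← hpiD, ← hpjD]
            simp [hz, Ne.symm hi]
          rw [if_pos this]
          cases hfh : gmax (pvHit paths iN) m <;>
            simp [PySem.Dict.insert_insert_self]
        · have hex : ¬ (∃ t : Nat, t < min pi.length pj.length ∧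
              (PySem.List.pyGet? pi (t : Int) == PySem.List.pyGet? pj (t : Int)) = true) :=
            fun h => hz ((pv_zip_any pi pj).mpr h)
          rw [if_neg hex]
          have : pvHit paths iN m = false := by
            simp only [pvHit]
            rw [← hpiD, ← hpjD]
            simp [hz]
          rw [if_neg (by simp [this])]

-- A's outer-loop body, named so the outer induction can abstract over it
def pvStep (paths : List (List Int)) (N : Int) : PySem.Dict Int Int → Int → PySem.Dict Int Int :=
  fun d i =>
    (PySem.List.pyRange 0 N 1).foldl (fun d j =>
      if i == j then d
      else
        let pi := PySem.List.pyGetD paths i []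
        let pj := PySem.List.pyGetD paths j []
        (PySem.List.pyRange 0 (min (pi.length : Int) (pj.length : Int)) 1).foldl
          (fun d t =>
            if PySem.List.pyGet? pi t == PySem.List.pyGet? pj t then d.insert i j else d)
          d) d

-- pvStep is A's middle loop: one insert of the greatest colliding index (or nothing)
theorem pvStep_eq (paths : List (List Int)) (n : Nat) (d : PySem.Dict Int Int) (iN : Nat) :
    pvStep paths (n : Int) d (iN : Int)
    = match gmax (pvHit paths iN) n with
      | none => d
      | some j => d.insert (iN : Int) (j : Int) := pv_middle_loop paths iN d n

-- outer-loop invariant: after robots 0..k-1 the dict's items are exactly the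
-- (i, gmax colliding index) pairs in ascending i, and every key is < k
theorem pv_outer_loop (paths : List (List Int)) (n k : Nat) :
    (((PySem.List.pyRange 0 (k : Int) 1).foldl (pvStep paths (n : Int))
        (PySem.Dict.empty : PySem.Dict Int Int)).items
    = (List.range k).filterMap (fun i =>
        (gmax (pvHit paths i) n).map (fun j => ((i : Int), (j : Int)))))
    ∧ ∀ x ∈ ((PySem.List.pyRange 0 (k : Int) 1).foldl (pvStep paths (n : Int))
        (PySem.Dict.empty : PySem.Dict Int Int)).keys, 0 ≤ x ∧ x < (k : Int) := by
  induction k with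
  | zero =>
      refine ⟨?_, by simp⟩
      simp [PySem.Dict.empty]
  | succ k ih =>
      obtain ⟨ihitems, ihkeys⟩ := ih
      have h : ((k + 1 : Nat) : Int) = (k : Int) + 1 := by push_cast; ring
      rw [h, PySem.List.pyRange_one_succ_right (by positivity), List.range_succ]
      simp only [List.foldl_append, List.foldl_cons, List.foldl_nil, List.filterMap_append,
        List.filterMap_cons, List.filterMap_nil]
      rw [pvStep_eq]
      set D := (PySem.List.pyRange 0 (k : Int) 1).foldl (pvStep paths (n : Int))
        (PySem.Dict.empty : PySem.Dict Int Int) with hD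
      have hnotmem : ¬ (((k : Nat) : Int) ∈ D.keys) := by
        intro hmem
        have := ihkeys _ hmem
        omega
      have hcont : D.contains ((k : Nat) : Int) = false := by
        rw [← Bool.not_eq_true, PySem.Dict.contains_iff_mem_keys]
        exact hnotmem
      cases gmax (pvHit paths k) n with
      | none =>
          refine ⟨by rw [ihitems]; simp, ?_⟩
          intro x hx
          have := ihkeys x hx
          omega
      | some j =>
          refine ⟨?_, ?_⟩
          · rw [PySem.Dict.items_insert_of_not_contains _ _ hcont, ihitems]
            simp
          · intro x hx
            rw [PySem.Dict.keys_insert_of_not_contains _ _ hcont] at hx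
            rcases List.mem_append.mp hx with hx | hx
            · have := ihkeys x hx; omega
            · simp at hx; omega

theorem pv_A_eq (paths : List (List Int)) :
    build_wait_for_graph paths
      = (List.range paths.length).filterMap (fun i =>
          (gmax (pvHit paths i) paths.length).map (fun j => ((i : Int), (j : Int)))) := by
  have hA : build_wait_for_graph paths
      = (((PySem.List.pyRange 0 ((paths.length : Nat) : Int) 1).foldl
          (pvStep paths ((paths.length : Nat) : Int))
          (PySem.Dict.empty : PySem.Dict Int Int))).items := rfl
  rw [hA, (pv_outer_loop paths paths.length paths.length).1]

-- ---------- B side ----------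

def pvAct (paths : List (List Int)) (t i : Nat) : Bool :=
  decide (t < (paths.getD i []).length)

def pvPos (paths : List (List Int)) (t i : Nat) : Int :=
  (paths.getD i []).getD t 0

-- robot j occupies cell (t, v)
def pvCell (paths : List (List Int)) (t : Nat) (v : Int) (j : Nat) : Bool :=
  pvAct paths t j && (pvPos paths t j == v)

-- robots i and j collide exactly at time t
def pvCollAt (paths : List (List Int)) (t i j : Nat) : Bool :=
  decide (j ≠ i) && pvAct paths t i && pvCell paths t (pvPos paths t i) j

-- robots i and j collide at some time < k
def pvCollT (paths : List (List Int)) (k i j : Nat) : Bool :=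
  (List.range k).any (fun t => pvCollAt paths t i j)

-- the value B's best dict holds for key x after processing all times < k
def pvB (paths : List (List Int)) (k : Nat) (x : Int) : Option Int :=
  if 0 ≤ x ∧ x < (paths.length : Int) then
    (gmax (pvCollT paths k x.toNat) paths.length).map (fun a => (a : Int))
  else none

-- the phase-1 fold body, on an index j instead of an enumerate pair
def pvPh1F (paths : List (List Int)) (t : Int)
    (md : PySem.Dict Int Int × PySem.Dict Int Int) (j : Int) :
    PySem.Dict Int Int × PySem.Dict Int Int :=
  if t < ((PySem.List.pyGetD paths j []).length : Int) then
    let v := PySem.List.pyGetD (PySem.List.pyGetD paths j []) t 0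
    let m2 := match md.1.get? v with
              | some w => md.2.insert v w
              | none => md.2
    (md.1.insert v j, m2)
  else md

theorem pv_phase1_eq (paths : List (List Int)) (t : Int) :
    pvPhase1 paths t
      = (PySem.List.pyRange 0 (paths.length : Int) 1).foldl (pvPh1F paths t)
          (PySem.Dict.empty, PySem.Dict.empty) := by
  unfold pvPhase1
  rw [PySem.List.enumerate_eq_map_pyRange paths ([] : List Int), List.foldl_map]
  rfl

theorem pv_ph1_loop (paths : List (List Int)) (k m : Nat) :
    (∀ v : Int, ((PySem.List.pyRange 0 (m : Int) 1).foldl (pvPh1F paths (k : Int))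
        (PySem.Dict.empty, PySem.Dict.empty)).1.get? v
      = (gmax (pvCell paths k v) m).map (fun a => (a : Int)))
    ∧ (∀ v : Int, ((PySem.List.pyRange 0 (m : Int) 1).foldl (pvPh1F paths (k : Int))
        (PySem.Dict.empty, PySem.Dict.empty)).2.get? v
      = ((gmax (pvCell paths k v) m).bind
          (fun a => gmax (pvCell paths k v) a)).map (fun a => (a : Int))) := by
  induction m with
  | zero =>
      constructor <;> intro v <;> simp [gmax, PySem.Dict.get?_empty]
  | succ m ih =>
      obtain ⟨ih1, ih2⟩ := ih
      have h : ((m + 1 : Nat) : Int) = (m : Int) + 1 := by push_cast; ring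
      rw [h, PySem.List.pyRange_one_succ_right (by positivity), List.foldl_append]
      simp only [List.foldl_cons, List.foldl_nil]
      set MD := (PySem.List.pyRange 0 (m : Int) 1).foldl (pvPh1F paths (k : Int))
        (PySem.Dict.empty, PySem.Dict.empty) with hMD
      have hgm : ∀ v : Int, gmax (pvCell paths k v) (m + 1)
          = if pvCell paths k v m = true then some m else gmax (pvCell paths k v) m :=
        fun _ => rfl
      have hD : PySem.List.pyGetD paths ((m : Nat) : Int) [] = paths.getD m [] :=
        PySem.List.pyGetD_natCast paths m []
      by_cases hact : pvAct paths k m = true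
      · have hcond : ((k : Nat) : Int) < (((PySem.List.pyGetD paths ((m : Nat) : Int) []).length : Nat) : Int) := by
          rw [hD]
          simp only [pvAct, decide_eq_true_eq] at hact
          exact_mod_cast hact
        have hv0 : PySem.List.pyGetD (PySem.List.pyGetD paths ((m : Nat) : Int) []) ((k : Nat) : Int) 0
            = pvPos paths k m := by
          rw [hD, PySem.List.pyGetD_natCast]
          rfl
        have hstep : pvPh1F paths (k : Int) MD ((m : Nat) : Int)
            = (MD.1.insert (pvPos paths k m) (m : Int),
               match MD.1.get? (pvPos paths k m) with
               | some w => MD.2.insert (pvPos paths k m) w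
               | none => MD.2) := by
          unfold pvPh1F
          rw [if_pos hcond, hv0]
        rw [hstep]
        have hcellT : pvCell paths k (pvPos paths k m) m = true := by
          simp [pvCell, hact]
        have hcellF : ∀ v : Int, v ≠ pvPos paths k m → pvCell paths k v m = false := by
          intro v hvv
          simp only [pvCell, Bool.and_eq_false_iff, beq_eq_false_iff_ne, ne_eq]
          right
          exact fun hc => hvv hc.symm
        constructor
        · intro v
          rw [PySem.Dict.get?_insert]
          by_cases hvv : v = pvPos paths k m
          · rw [if_pos hvv, hvv, hgm, if_pos hcellT]
            rfl
          · rw [if_neg hvv, hgm, if_neg (by simp [hcellF v hvv]), ih1]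
        · intro v
          by_cases hvv : v = pvPos paths k m
          · cases hg : MD.1.get? (pvPos paths k m) with
            | none =>
                have hgm0 : gmax (pvCell paths k (pvPos paths k m)) m = none := by
                  have hh := ih1 (pvPos paths k m)
                  rw [hg] at hh
                  cases hgg : gmax (pvCell paths k (pvPos paths k m)) m
                  · rfl
                  · rw [hgg] at hh; simp at hh
                rw [ih2 v, hvv, hgm, if_pos hcellT]
                simp [hgm0]
            | some w =>
                have hh := ih1 (pvPos paths k m)
                rw [hg] at hh
                cases hgg : gmax (pvCell paths k (pvPos paths k m)) m with
                | none => rw [hgg] at hh; simp at hh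
                | some a =>
                    rw [hgg] at hh
                    simp at hh
                    rw [PySem.Dict.get?_insert, if_pos hvv, hvv, hgm, if_pos hcellT]
                    simp [hgg, hh]
          · cases hg : MD.1.get? (pvPos paths k m) with
            | none =>
                rw [ih2 v, hgm, if_neg (by simp [hcellF v hvv])]
            | some w =>
                rw [PySem.Dict.get?_insert, if_neg hvv, ih2 v, hgm,
                  if_neg (by simp [hcellF v hvv])]
      · have hcond : ¬ (((k : Nat) : Int) < (((PySem.List.pyGetD paths ((m : Nat) : Int) []).length : Nat) : Int)) := by
          rw [hD]
          simp only [pvAct, decide_eq_true_eq] at hact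
          exact_mod_cast hact
        have hstep : pvPh1F paths (k : Int) MD ((m : Nat) : Int) = MD := by
          unfold pvPh1F
          rw [if_neg hcond]
        rw [hstep]
        have hcell : ∀ v : Int, pvCell paths k v m = false := by
          intro v
          simp only [pvCell, Bool.and_eq_false_iff]
          left
          simpa using hact
        constructor
        · intro v
          rw [hgm, if_neg (by simp [hcell v]), ih1]
        · intro v
          rw [hgm, if_neg (by simp [hcell v]), ih2]

-- phase-1 invariant: m1/m2 hold the largest / second-largest index of each cell
theorem pv_phase1_inv (paths : List (List Int)) (k : Nat) :
    (∀ v : Int, (pvPhase1 paths (k : Int)).1.get? v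
        = (gmax (pvCell paths k v) paths.length).map (fun a => (a : Int)))
    ∧ (∀ v : Int, (pvPhase1 paths (k : Int)).2.get? v
        = ((gmax (pvCell paths k v) paths.length).bind
            (fun a => gmax (pvCell paths k v) a)).map (fun a => (a : Int))) := by
  rw [pv_phase1_eq]
  exact pv_ph1_loop paths k paths.length

-- collisions before time k+1 split into collisions before k and collisions at k
theorem pvCollT_succ (paths : List (List Int)) (k i j : Nat) :
    pvCollT paths (k + 1) i j = (pvCollT paths k i j || pvCollAt paths k i j) := by
  simp [pvCollT, List.range_succ]

-- the phase-2 fold body, on an index j instead of an enumerate pair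
def pvPh2F (paths : List (List Int)) (t : Int) (m1 m2 : PySem.Dict Int Int)
    (best : PySem.Dict Int Int) (j : Int) : PySem.Dict Int Int :=
  if t < ((PySem.List.pyGetD paths j []).length : Int) then
    let v := PySem.List.pyGetD (PySem.List.pyGetD paths j []) t 0
    match m2.get? v with
    | some s =>
        let cand := if j == m1.getD v 0 then s else m1.getD v 0
        match best.get? j with
        | none => best.insert j cand
        | some b => if b < cand then best.insert j cand else best
    | none => best
  else best

theorem pv_phase2_eq (paths : List (List Int)) (t : Int) (m1 m2 best : PySem.Dict Int Int) :
    pvPhase2 paths t m1 m2 best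
      = (PySem.List.pyRange 0 (paths.length : Int) 1).foldl (pvPh2F paths t m1 m2) best := by
  unfold pvPhase2
  rw [PySem.List.enumerate_eq_map_pyRange paths ([] : List Int), List.foldl_map]
  rfl

theorem pv_ph2_loop (paths : List (List Int)) (k : Nat) (best0 : PySem.Dict Int Int)
    (hb : ∀ x : Int, best0.get? x = pvB paths k x) (hnd : best0.keys.Nodup)
    (m : Nat) (hm : m ≤ paths.length) :
    (∀ x : Int, ((PySem.List.pyRange 0 (m : Int) 1).foldl
        (pvPh2F paths (k : Int) (pvPhase1 paths (k : Int)).1 (pvPhase1 paths (k : Int)).2)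
        best0).get? x
      = if 0 ≤ x ∧ x < (m : Int) then pvB paths (k + 1) x else pvB paths k x)
    ∧ ((PySem.List.pyRange 0 (m : Int) 1).foldl
        (pvPh2F paths (k : Int) (pvPhase1 paths (k : Int)).1 (pvPhase1 paths (k : Int)).2)
        best0).keys.Nodup := by
  induction m with
  | zero =>
      refine ⟨fun x => ?_, by simpa using hnd⟩
      rw [if_neg (by omega)]
      exact hb x
  | succ m ih =>
      obtain ⟨ih1, ihnd⟩ := ih (by omega)
      have hmn : m < paths.length := by omega
      have h : ((m + 1 : Nat) : Int) = (m : Int) + 1 := by push_cast; ring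
      rw [h, PySem.List.pyRange_one_succ_right (by positivity), List.foldl_append]
      simp only [List.foldl_cons, List.foldl_nil]
      set BM := (PySem.List.pyRange 0 (m : Int) 1).foldl
        (pvPh2F paths (k : Int) (pvPhase1 paths (k : Int)).1 (pvPhase1 paths (k : Int)).2)
        best0 with hBM
      have hD : PySem.List.pyGetD paths ((m : Nat) : Int) [] = paths.getD m [] :=
        PySem.List.pyGetD_natCast paths m []
      -- extending the processed-prefix bound from m to m+1 once key ↑m is right
      have hext : ∀ (B : PySem.Dict Int Int),
          (∀ x : Int, x ≠ ((m : Nat) : Int) →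
            B.get? x = if 0 ≤ x ∧ x < (m : Int) then pvB paths (k + 1) x else pvB paths k x) →
          B.get? ((m : Nat) : Int) = pvB paths (k + 1) ((m : Nat) : Int) →
          (∀ x : Int, B.get? x
            = if 0 ≤ x ∧ x < ((m : Int) + 1) then pvB paths (k + 1) x else pvB paths k x) := by
        intro B hB hBm x
        by_cases hx : x = ((m : Nat) : Int)
        · rw [hx, if_pos (by constructor <;> omega)]
          exact hBm
        · rw [hB x hx]
          by_cases hlt : 0 ≤ x ∧ x < (m : Int)
          · rw [if_pos hlt, if_pos (by omega)]
          · rw [if_neg hlt, if_neg (by omega)]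
      by_cases hact : pvAct paths k m = true
      · have hcond : ((k : Nat) : Int) < (((PySem.List.pyGetD paths ((m : Nat) : Int) []).length : Nat) : Int) := by
          rw [hD]
          simp only [pvAct, decide_eq_true_eq] at hact
          exact_mod_cast hact
        have hv0 : PySem.List.pyGetD (PySem.List.pyGetD paths ((m : Nat) : Int) []) ((k : Nat) : Int) 0
            = pvPos paths k m := by
          rw [hD, PySem.List.pyGetD_natCast]
          rfl
        set v0 := pvPos paths k m with hv0def
        have hcellT : pvCell paths k v0 m = true := by
          simp [pvCell, hact, hv0def]
        -- the top index of robot m's cell exists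
        obtain ⟨a, hga⟩ : ∃ a, gmax (pvCell paths k v0) paths.length = some a := by
          cases hgg : gmax (pvCell paths k v0) paths.length with
          | none => exact absurd (gmax_eq_none.mp hgg m hmn) (by simp [hcellT])
          | some a => exact ⟨a, rfl⟩
        cases hm2 : (pvPhase1 paths (k : Int)).2.get? v0 with
        | none =>
            have hstep0 : pvPh2F paths (k : Int) (pvPhase1 paths (k : Int)).1
                (pvPhase1 paths (k : Int)).2 BM ((m : Nat) : Int) = BM := by
              unfold pvPh2F
              rw [if_pos hcond, hv0]
              simp only [hm2]
            rw [hstep0]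
            -- robot m is alone in its cell: nothing collides with it at time k
            have hbind : (gmax (pvCell paths k v0) paths.length).bind
                (fun a => gmax (pvCell paths k v0) a) = none := by
              have hh := (pv_phase1_inv paths k).2 v0
              rw [hm2] at hh
              cases hbb : (gmax (pvCell paths k v0) paths.length).bind
                  (fun a => gmax (pvCell paths k v0) a)
              · rfl
              · rw [hbb] at hh; simp at hh
            rw [hga] at hbind
            simp only [Option.bind_some] at hbind
            have hnone : ∀ j, j < paths.length → pvCollAt paths k m j = false := by
              intro j hj
              by_contra hcj
              have hcj : pvCollAt paths k m j = true := by
                cases hc : pvCollAt paths k m j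
                · exact absurd hc hcj
                · rfl
              simp only [pvCollAt, Bool.and_eq_true, decide_eq_true_eq] at hcj
              obtain ⟨⟨hjm, -⟩, hcell⟩ := hcj
              rw [← hv0def] at hcell
              have hja : j ≤ a := gmax_isMax hga j hj hcell
              have hma : m ≤ a := gmax_isMax hga m hmn hcellT
              have hja' : j = a := by
                rcases Nat.lt_or_ge j a with hlt | hge
                · exact absurd hcell (by simp [gmax_eq_none.mp hbind j hlt])
                · omega
              have hma' : m = a := by
                rcases Nat.lt_or_ge m a with hlt | hge
                · exact absurd hcellT (by simp [gmax_eq_none.mp hbind m hlt])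
                · omega
              exact hjm (by omega)
            have hBm : BM.get? ((m : Nat) : Int) = pvB paths (k + 1) ((m : Nat) : Int) := by
              rw [ih1, if_neg (by omega)]
              unfold pvB
              rw [if_pos (by constructor <;> [positivity; exact_mod_cast hmn]),
                if_pos (by constructor <;> [positivity; exact_mod_cast hmn])]
              simp only [Int.toNat_natCast]
              have hgc : gmax (pvCollT paths k m) paths.length
                  = gmax (pvCollT paths (k + 1) m) paths.length := by
                apply gmax_congr
                intro j hj
                rw [pvCollT_succ, hnone j hj, Bool.or_false]
              rw [hgc]
            exact ⟨hext BM (fun x _ => ih1 x) hBm, ihnd⟩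
        | some s =>
            -- cell has ≥ 2 robots: a = top, b = second, s = ↑b, m1 holds ↑a
            have hh := (pv_phase1_inv paths k).2 v0
            rw [hm2, hga] at hh
            simp only [Option.bind_some] at hh
            obtain ⟨b, hgb, hsb⟩ : ∃ b, gmax (pvCell paths k v0) a = some b ∧ s = (b : Int) := by
              cases hgg : gmax (pvCell paths k v0) a with
              | none => rw [hgg] at hh; simp at hh
              | some b =>
                  rw [hgg] at hh
                  simp at hh
                  exact ⟨b, rfl, hh⟩
            have hm1 : (pvPhase1 paths (k : Int)).1.getD v0 0 = (a : Int) := by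
              apply PySem.Dict.getD_of_get?_eq_some
              rw [(pv_phase1_inv paths k).1 v0, hga]
              rfl
            set cN : Nat := if m = a then b else a with hcN
            have hcand : (if ((m : Nat) : Int) == (pvPhase1 paths (k : Int)).1.getD v0 0 then s
                else (pvPhase1 paths (k : Int)).1.getD v0 0) = (cN : Int) := by
              rw [hm1, hsb, hcN]
              by_cases hma : m = a
              · rw [if_pos (by simp [hma]), if_pos hma]
              · rw [if_neg (by simp [hma]), if_neg hma]
            -- the greatest index colliding with m exactly at time k is cN
            have hcoll : gmax (fun j => pvCollAt paths k m j) paths.length = some cN := by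
              have hrw : ∀ j, j < paths.length →
                  pvCollAt paths k m j = (decide (j ≠ m) && pvCell paths k v0 j) := by
                intro j _
                simp [pvCollAt, hact, hv0def]
              rw [gmax_congr paths.length hrw, gmax_erase paths.length hcellT hmn, hcN]
              by_cases hma : m = a
              · rw [if_pos (by rw [hga, hma]), if_pos hma, hma]
                exact hgb
              · rw [if_neg (by rw [hga]; intro hc; exact hma (Option.some_inj.mp hc).symm),
                  if_neg hma]
                exact hga
            have hBnew : pvB paths (k + 1) ((m : Nat) : Int)
                = (omax (gmax (pvCollT paths k m) paths.length) (some cN)).map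
                    (fun a => (a : Int)) := by
              unfold pvB
              rw [if_pos (by constructor <;> [positivity; exact_mod_cast hmn])]
              simp only [Int.toNat_natCast]
              have hgc : gmax (pvCollT paths (k + 1) m) paths.length
                  = omax (gmax (pvCollT paths k m) paths.length) (some cN) := by
                rw [← hcoll, ← gmax_or]
                apply gmax_congr
                intro j _
                rw [pvCollT_succ]
              rw [hgc]
            have hold : BM.get? ((m : Nat) : Int)
                = (gmax (pvCollT paths k m) paths.length).map (fun a => (a : Int)) := by
              rw [ih1, if_neg (by omega)]
              unfold pvB
              rw [if_pos (by constructor <;> [positivity; exact_mod_cast hmn])]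
              simp only [Int.toNat_natCast]
            cases hbm : BM.get? ((m : Nat) : Int) with
            | none =>
                have hgold : gmax (pvCollT paths k m) paths.length = none := by
                  rw [hbm] at hold
                  cases hgg : gmax (pvCollT paths k m) paths.length
                  · rfl
                  · rw [hgg] at hold; simp at hold
                have hstep2 : pvPh2F paths (k : Int) (pvPhase1 paths (k : Int)).1
                    (pvPhase1 paths (k : Int)).2 BM ((m : Nat) : Int)
                    = BM.insert ((m : Nat) : Int) (cN : Int) := by
                  unfold pvPh2F
                  rw [if_pos hcond, hv0]
                  simp only [hm2, hcand, hbm]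
                rw [hstep2]
                refine ⟨hext _ (fun x hx => ?_) ?_, PySem.Dict.nodup_keys_insert _ _ _ ihnd⟩
                · rw [PySem.Dict.get?_insert, if_neg hx]
                  exact ih1 x
                · rw [PySem.Dict.get?_insert, if_pos rfl, hBnew, hgold]
                  rfl
            | some b0 =>
                have hb0' : ∃ a0, gmax (pvCollT paths k m) paths.length = some a0 ∧ b0 = (a0 : Int) := by
                  rw [hbm] at hold
                  cases hgg : gmax (pvCollT paths k m) paths.length with
                  | none => rw [hgg] at hold; simp at hold
                  | some a0 =>
                      rw [hgg] at hold
                      simp at hold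
                      exact ⟨a0, rfl, hold⟩
                obtain ⟨a0, hga0, hb0⟩ := hb0'
                by_cases hlt : b0 < (cN : Int)
                · have hstep2 : pvPh2F paths (k : Int) (pvPhase1 paths (k : Int)).1
                      (pvPhase1 paths (k : Int)).2 BM ((m : Nat) : Int)
                      = BM.insert ((m : Nat) : Int) (cN : Int) := by
                    unfold pvPh2F
                    rw [if_pos hcond, hv0]
                    simp only [hm2, hcand, hbm, if_pos hlt]
                  rw [hstep2]
                  refine ⟨hext _ (fun x hx => ?_) ?_, PySem.Dict.nodup_keys_insert _ _ _ ihnd⟩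
                  · rw [PySem.Dict.get?_insert, if_neg hx]
                    exact ih1 x
                  · rw [PySem.Dict.get?_insert, if_pos rfl, hBnew, hga0]
                    have hmx : max a0 cN = cN := by
                      rw [hb0] at hlt
                      have : a0 < cN := by exact_mod_cast hlt
                      omega
                    simp [omax, hmx]
                · have hstep2 : pvPh2F paths (k : Int) (pvPhase1 paths (k : Int)).1
                      (pvPhase1 paths (k : Int)).2 BM ((m : Nat) : Int) = BM := by
                    unfold pvPh2F
                    rw [if_pos hcond, hv0]
                    simp only [hm2, hcand, hbm, if_neg hlt]
                  rw [hstep2]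
                  refine ⟨hext _ (fun x _ => ih1 x) ?_, ihnd⟩
                  rw [hbm, hBnew, hga0]
                  have hmx : max a0 cN = a0 := by
                    rw [hb0] at hlt
                    have h2 : ¬ a0 < cN := by exact_mod_cast hlt
                    omega
                  simp [omax, hmx, hb0]
      · -- robot m is inactive at time k: no update, and its collision set does not grow
        have hcond : ¬ (((k : Nat) : Int) < (((PySem.List.pyGetD paths ((m : Nat) : Int) []).length : Nat) : Int)) := by
          rw [hD]
          simp only [pvAct, decide_eq_true_eq] at hact
          exact_mod_cast hact
        have hstep : pvPh2F paths (k : Int) (pvPhase1 paths (k : Int)).1 (pvPhase1 paths (k : Int)).2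
            BM ((m : Nat) : Int) = BM := by
          unfold pvPh2F
          rw [if_neg hcond]
        rw [hstep]
        have hnone : ∀ j, j < paths.length → pvCollAt paths k m j = false := by
          intro j _
          simp only [pvCollAt, Bool.and_eq_false_iff]
          left
          right
          simpa using hact
        have hBm : BM.get? ((m : Nat) : Int) = pvB paths (k + 1) ((m : Nat) : Int) := by
          rw [ih1, if_neg (by omega)]
          unfold pvB
          rw [if_pos (by constructor <;> [positivity; exact_mod_cast hmn]),
            if_pos (by constructor <;> [positivity; exact_mod_cast hmn])]
          simp only [Int.toNat_natCast]
          have hgc : gmax (pvCollT paths k m) paths.length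
              = gmax (pvCollT paths (k + 1) m) paths.length := by
            apply gmax_congr
            intro j hj
            rw [pvCollT_succ, hnone j hj, Bool.or_false]
          rw [hgc]
        exact ⟨hext BM (fun x _ => ih1 x) hBm, ihnd⟩

-- the outer time loop: after all k time steps best holds pvB at k
theorem pv_time_loop (paths : List (List Int)) (k : Nat) :
    (∀ x : Int, ((PySem.List.pyRange 0 (k : Int) 1).foldl
        (fun best t => pvPhase2 paths t (pvPhase1 paths t).1 (pvPhase1 paths t).2 best)
        (PySem.Dict.empty : PySem.Dict Int Int)).get? x = pvB paths k x)
    ∧ ((PySem.List.pyRange 0 (k : Int) 1).foldl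
        (fun best t => pvPhase2 paths t (pvPhase1 paths t).1 (pvPhase1 paths t).2 best)
        (PySem.Dict.empty : PySem.Dict Int Int)).keys.Nodup := by
  induction k with
  | zero =>
      have hnil : PySem.List.pyRange 0 ((0 : Nat) : Int) 1 = [] := rfl
      rw [hnil]
      refine ⟨fun x => ?_, by simp⟩
      simp only [List.foldl_nil]
      rw [PySem.Dict.get?_empty]
      unfold pvB
      split_ifs with hx
      · rw [gmax_eq_none.mpr (fun j hj => by simp [pvCollT])]
        rfl
      · rfl
  | succ k ih =>
      obtain ⟨ih1, ihnd⟩ := ih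
      have h : ((k + 1 : Nat) : Int) = (k : Int) + 1 := by push_cast; ring
      rw [h, PySem.List.pyRange_one_succ_right (by positivity), List.foldl_append]
      simp only [List.foldl_cons, List.foldl_nil]
      rw [pv_phase2_eq]
      obtain ⟨hall, hnd⟩ := pv_ph2_loop paths k _ ih1 ihnd paths.length (le_refl _)
      refine ⟨fun x => ?_, hnd⟩
      rw [hall x]
      by_cases hx : 0 ≤ x ∧ x < (paths.length : Int)
      · rw [if_pos hx]
      · rw [if_neg hx]
        unfold pvB
        rw [if_neg hx, if_neg hx]

-- every path's length is bounded by Source B's T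
theorem pv_len_le (paths : List (List Int)) (i : Nat) (hi : i < paths.length) :
    ((paths.getD i []).length : Int) ≤ pvMaxLen paths := by
  have hmem : ((paths.getD i []).length : Int) ∈ paths.map (fun p => (p.length : Int)) := by
    apply List.mem_map_of_mem
    rw [List.getD_eq_getElem paths [] hi]
    exact List.getElem_mem hi
  cases hmax : PySem.List.max? (paths.map (fun p => (p.length : Int))) (fun x => x) with
  | none =>
      rw [PySem.List.max?_eq_none_iff] at hmax
      rw [hmax] at hmem
      cases hmem
  | some M =>
      have hle := PySem.List.max?_isMax hmax _ hmem
      unfold pvMaxLen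
      rw [hmax]
      simpa using hle

theorem pv_maxlen_nonneg (paths : List (List Int)) : 0 ≤ pvMaxLen paths := by
  unfold pvMaxLen
  cases hmax : PySem.List.max? (paths.map (fun p => (p.length : Int))) (fun x => x) with
  | none => simp
  | some M =>
      have hm := PySem.List.max?_mem hmax
      obtain ⟨p, -, rfl⟩ := List.mem_map.mp hm
      simp

-- collision-over-all-time coincides with A's pairwise test (T = max length)
theorem pv_coll_eq_hit (paths : List (List Int)) (i j : Nat) (hi : i < paths.length) :
    pvCollT paths (pvMaxLen paths).toNat i j = pvHit paths i j := by
  apply Bool.coe_iff_coe.mp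
  constructor
  · intro hc
    simp only [pvCollT, List.any_eq_true, List.mem_range] at hc
    obtain ⟨t, ht, hc⟩ := hc
    simp only [pvCollAt, pvCell, pvAct, pvPos, Bool.and_eq_true, decide_eq_true_eq,
      beq_iff_eq] at hc
    obtain ⟨⟨hji, hti⟩, htj, hpos⟩ := hc
    simp only [pvHit, Bool.and_eq_true, decide_eq_true_eq]
    refine ⟨hji, (pv_zip_any _ _).mpr ⟨t, by omega, ?_⟩⟩
    rw [PySem.List.pyGet?_natCast, PySem.List.pyGet?_natCast,
      List.getElem?_eq_getElem hti, List.getElem?_eq_getElem htj]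
    rw [List.getD_eq_getElem _ 0 htj, List.getD_eq_getElem _ 0 hti] at hpos
    simp only [beq_iff_eq, Option.some_inj]
    exact hpos.symm
  · intro hh
    simp only [pvHit, Bool.and_eq_true, decide_eq_true_eq] at hh
    obtain ⟨hji, hz⟩ := hh
    obtain ⟨t, ht, he⟩ := (pv_zip_any _ _).mp hz
    have hti : t < (paths.getD i []).length := by omega
    have htj : t < (paths.getD j []).length := by omega
    have hT : t < (pvMaxLen paths).toNat := by
      have h1 := pv_len_le paths i hi
      omega
    simp only [pvCollT, List.any_eq_true, List.mem_range]
    refine ⟨t, hT, ?_⟩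
    simp only [pvCollAt, pvCell, pvAct, pvPos, Bool.and_eq_true, decide_eq_true_eq,
      beq_iff_eq]
    rw [PySem.List.pyGet?_natCast, PySem.List.pyGet?_natCast,
      List.getElem?_eq_getElem hti, List.getElem?_eq_getElem htj] at he
    simp only [beq_iff_eq, Option.some_inj] at he
    exact ⟨⟨hji, hti⟩, htj, by rw [List.getD_eq_getElem _ 0 htj, List.getD_eq_getElem _ 0 hti, he]⟩

-- A's filterMap over the full range is its map over the surviving indices
theorem pv_splitA (paths : List (List Int)) (l : List Nat) :
    l.filterMap (fun i => (gmax (pvHit paths i) paths.length).map (fun j => ((i : Int), (j : Int))))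
      = List.map (fun i : Nat => ((i : Int), (((gmax (pvHit paths i) paths.length).getD 0 : Nat) : Int)))
          (l.filter (fun i => (gmax (pvHit paths i) paths.length).isSome)) := by
  induction l with
  | nil => rfl
  | cons a l ih =>
      rw [List.filterMap_cons, List.filter_cons]
      cases hf : gmax (pvHit paths a) paths.length with
      | none =>
          simpa using ih
      | some b =>
          simp only [Option.pure_def, Option.bind_eq_bind] at ih ⊢
          simp only [Option.bind_some, Option.map_some, Option.isSome_some,
            if_pos, List.map_cons]
          rw [hf, Option.getD_some]
          exact congrArg _ ih

-- ===== VERDICT (by name: the statement is the Claim_ definition above) =====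
theorem build_wait_for_graph_spec : Claim_equal_build_wait_for_graph := by
  intro paths _
  unfold Spec_build_wait_for_graph
  rw [pv_A_eq]
  have hT0 : 0 ≤ pvMaxLen paths := pv_maxlen_nonneg paths
  have hTcast : (((pvMaxLen paths).toNat : Nat) : Int) = pvMaxLen paths := Int.toNat_of_nonneg hT0
  have hBdef : build_wait_for_graph_alt paths
      = (PySem.List.sorted ((PySem.List.pyRange 0 (pvMaxLen paths) 1).foldl
            (fun best t => pvPhase2 paths t (pvPhase1 paths t).1 (pvPhase1 paths t).2 best)
            (PySem.Dict.empty : PySem.Dict Int Int)).keys (fun x => x) false).filterMap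
          (fun k => (((PySem.List.pyRange 0 (pvMaxLen paths) 1).foldl
            (fun best t => pvPhase2 paths t (pvPhase1 paths t).1 (pvPhase1 paths t).2 best)
            (PySem.Dict.empty : PySem.Dict Int Int)).get? k).map (fun v => (k, v))) := rfl
  rw [hBdef, ← hTcast]
  obtain ⟨hbest, hnd⟩ := pv_time_loop paths (pvMaxLen paths).toNat
  set BST := (PySem.List.pyRange 0 (((pvMaxLen paths).toNat : Nat) : Int) 1).foldl
      (fun best t => pvPhase2 paths t (pvPhase1 paths t).1 (pvPhase1 paths t).2 best)
      (PySem.Dict.empty : PySem.Dict Int Int) with hBST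
  -- values at in-range keys
  have hval : ∀ i : Nat, i < paths.length →
      BST.get? ((i : Nat) : Int) = (gmax (pvHit paths i) paths.length).map (fun a => (a : Int)) := by
    intro i hi
    rw [hbest]
    unfold pvB
    rw [if_pos (by constructor <;> [positivity; exact_mod_cast hi])]
    simp only [Int.toNat_natCast]
    rw [gmax_congr paths.length (fun j _ => pv_coll_eq_hit paths i j hi)]
  -- key membership
  have hmemkeys : ∀ x : Int, x ∈ BST.keys ↔ ¬ BST.get? x = none := by
    intro x
    rw [← PySem.Dict.contains_iff_mem_keys]
    constructor
    · intro hc hn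
      rw [PySem.Dict.get?_eq_none_iff_contains] at hn
      rw [hn] at hc
      cases hc
    · intro hn
      cases hc : BST.contains x
      · exact absurd ((PySem.Dict.get?_eq_none_iff_contains BST x).mpr hc) hn
      · rfl
  -- the sorted key list is the ascending list of colliding robots
  have hsorted : PySem.List.sorted BST.keys (fun x => x) false
      = List.map (fun i : Nat => ((i : Nat) : Int))
          ((List.range paths.length).filter (fun i => (gmax (pvHit paths i) paths.length).isSome)) := by
    apply PySem.List.sorted_eq_of_perm_of_pairwise_lt
    · rw [List.perm_ext_iff_of_nodup ?_ hnd]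
      · intro x
        rw [List.mem_map, hmemkeys x]
        constructor
        · rintro ⟨i, hif, rfl⟩
          rw [List.mem_filter, List.mem_range] at hif
          obtain ⟨hi, hs⟩ := hif
          rw [hval i hi]
          cases hg : gmax (pvHit paths i) paths.length
          · rw [hg] at hs; cases hs
          · simp
        · intro hn
          rw [hbest] at hn
          unfold pvB at hn
          by_cases hx : 0 ≤ x ∧ x < (paths.length : Int)
          · rw [if_pos hx] at hn
            have hxi : ((x.toNat : Nat) : Int) = x := Int.toNat_of_nonneg hx.1
            have hi : x.toNat < paths.length := by omega
            refine ⟨x.toNat, ?_, hxi⟩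
            rw [List.mem_filter, List.mem_range]
            refine ⟨hi, ?_⟩
            rw [← gmax_congr paths.length (fun j _ => pv_coll_eq_hit paths x.toNat j hi)]
            cases hg : gmax (pvCollT paths (pvMaxLen paths).toNat x.toNat) paths.length
            · rw [hg] at hn; simp at hn
            · simp
          · rw [if_neg hx] at hn
            exact absurd rfl hn
      · refine List.Nodup.map ?_ (List.Nodup.filter _ List.nodup_range)
        intro a b hab
        simpa using hab
    · rw [List.pairwise_map]
      exact (List.Pairwise.sublist List.filter_sublist List.pairwise_lt_range).imp
        (by intro a b hab; exact_mod_cast hab)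
  have hB2 : List.filterMap
        ((fun k => (BST.get? k).map (fun v => (k, v))) ∘ (fun i : Nat => ((i : Nat) : Int)))
        ((List.range paths.length).filter (fun i => (gmax (pvHit paths i) paths.length).isSome))
      = List.map (fun i : Nat => ((i : Int),
            (((gmax (pvHit paths i) paths.length).getD 0 : Nat) : Int)))
          ((List.range paths.length).filter (fun i => (gmax (pvHit paths i) paths.length).isSome)) := by
    rw [← List.filterMap_eq_map]
    apply List.filterMap_congr
    intro i hif
    rw [List.mem_filter, List.mem_range] at hif
    obtain ⟨hi, hs⟩ := hif
    simp only [Function.comp]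
    rw [hval i hi]
    cases hg : gmax (pvHit paths i) paths.length
    · rw [hg] at hs; cases hs
    · simp
  rw [hsorted, List.filterMap_map, hB2, pv_splitA paths (List.range paths.length)]
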